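-- pv_equiv track=rewrite | github.com/Jerry3T/CodeWars_Jerry3T | D_6kyu_zeroPlentifulArray.py | zero_plentiful
-- ===== SOURCE A (Python) =====
-- def zero_plentiful(arr):
--     totalCount = 0;
--     i = 0;
--     while i < len(arr):
--         flag = False
--         count = 0
--         if arr[i] == 0:
--             for z in range(i, len(arr)):
--                 if arr[z] == 0:
--                     count+=1
--                 else:
--                     i = z
--                     flag = True
--                     break
--             if count < 4:
--                 return 0
--             if count >= 4:
--                 totalCount+=1
--             if flag == False and count >= 4:
--                 return totalCount
--         else:
--             i+=1
--     return totalCount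
-- ===== SOURCE B (Python) =====
-- def zero_plentiful(arr):
--     # build the list of maximal zero-run lengths in one pass, then judge it
--     runs = []
--     cur = 0
--     for x in arr:
--         if x == 0:
--             cur += 1
--         else:
--             if cur != 0:
--                 runs.append(cur)
--             cur = 0
--     if cur != 0:
--         runs.append(cur)
--     return 0 if any(r < 4 for r in runs) else len(runs)
-- ===== Notes on version B (the rewrite author's own statement) =====
-- stated objective: simpler
-- what changed: Replaces A's index-jumping while loop with a nested rescanning for loop and three return points by a single pass that collects all maximal zero-run lengths into a list, then one final expression (0 if any run is shorter than 4, else the number of runs).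
import Mathlib
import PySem

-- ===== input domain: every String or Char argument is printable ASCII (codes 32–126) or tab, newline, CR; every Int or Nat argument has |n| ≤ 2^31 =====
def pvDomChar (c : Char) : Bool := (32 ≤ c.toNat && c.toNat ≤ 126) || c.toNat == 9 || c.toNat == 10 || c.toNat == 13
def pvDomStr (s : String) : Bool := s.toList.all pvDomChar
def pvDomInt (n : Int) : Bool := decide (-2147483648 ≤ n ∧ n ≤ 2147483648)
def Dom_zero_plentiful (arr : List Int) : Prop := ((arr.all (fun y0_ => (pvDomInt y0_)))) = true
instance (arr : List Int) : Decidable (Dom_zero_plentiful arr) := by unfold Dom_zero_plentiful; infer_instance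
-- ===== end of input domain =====

-- B replaces A's index-jumping while loop (with an inner rescanning for loop and three
-- return points) by one pass collecting the maximal zero-run lengths, then a single
-- final expression; objective: simpler. Behaviour is identical (exact equivalence).

-- ===== PORT A =====

-- inner `for z in range(i, len(arr))` loop: returns (count, flag, i) after the loop/break
def zpInner (arr : List Int) (z : Nat) (count : Nat) (i : Nat) : Nat × Bool × Nat :=
  if h : z < arr.length then
    if arr[z] = 0 then zpInner arr (z + 1) (count + 1) i
    else (count, true, z)
  else (count, false, i)
termination_by arr.length - z

-- outer while loop; fuel only makes the loop total (i strictly increases each iteration)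
def zpLoop (arr : List Int) : Nat → Nat → Int → Int
  | 0, _, tc => tc
  | fuel + 1, i, tc =>
    if _h : i < arr.length then
      if arr[i] = 0 then
        let r := zpInner arr i 0 i
        if r.1 < 4 then 0
        else if r.2.1 = false then tc + 1
        else zpLoop arr fuel r.2.2 (tc + 1)
      else zpLoop arr fuel (i + 1) tc
    else tc

def zero_plentiful (arr : List Int) : Int := zpLoop arr (arr.length + 1) 0 0

-- ===== PORT B =====

-- the single pass of Source B: fold carrying (runs, cur)
def zpStep (p : List Nat × Nat) (x : Int) : List Nat × Nat :=
  if x = 0 then (p.1, p.2 + 1)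
  else if p.2 ≠ 0 then (p.1 ++ [p.2], 0) else (p.1, 0)

def zero_plentiful_alt (arr : List Int) : Int :=
  let p := arr.foldl zpStep ([], 0)
  let runs := if p.2 ≠ 0 then p.1 ++ [p.2] else p.1
  if runs.any (fun r => r < 4) then 0 else (runs.length : Int)

-- ===== PRECONDITION & SPEC =====
def Spec_zero_plentiful (arr : List Int) (out : Int) : Prop := out = zero_plentiful_alt arr
instance (arr : List Int) (out : Int) : Decidable (Spec_zero_plentiful arr out) := by unfold Spec_zero_plentiful; infer_instance

-- ===== CLAIM (what is proved, stated in full; the proofs are below) =====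
def Claim_equal_zero_plentiful : Prop := ∀ (arr : List Int), Dom_zero_plentiful arr → Spec_zero_plentiful arr (zero_plentiful arr)

-- ===== LEMMAS AND PROOFS =====

-- reference list of maximal zero-run lengths, with a pending run of `cur` zeros
def R (cur : Nat) : List Int → List Nat
  | [] => if cur ≠ 0 then [cur] else []
  | x :: xs => if x = 0 then R (cur + 1) xs
               else if cur ≠ 0 then cur :: R 0 xs else R 0 xs

-- length of the leading zero run
def leadc : List Int → Nat
  | [] => 0
  | x :: xs => if x = 0 then leadc xs + 1 else 0

lemma leadc_le (s : List Int) : leadc s ≤ s.length := by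
  induction s with
  | nil => simp [leadc]
  | cons x xs ih => simp only [leadc, List.length_cons]; split <;> omega

lemma leadc_cons_zero (xs : List Int) : leadc (0 :: xs) = leadc xs + 1 := by simp [leadc]

-- B's fold characterised by R
lemma foldl_R (l : List Int) : ∀ (acc : List Nat) (cur : Nat),
    (let p := l.foldl zpStep (acc, cur)
     if p.2 ≠ 0 then p.1 ++ [p.2] else p.1) = acc ++ R cur l := by
  induction l with
  | nil => intro acc cur; simp only [List.foldl_nil, R]; split <;> simp
  | cons x xs ih =>
    intro acc cur
    simp only [List.foldl_cons, R, zpStep]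
    by_cases hx : x = 0
    · simp only [hx, if_pos rfl, ite_true]
      exact ih acc (cur + 1)
    · simp only [if_neg hx]
      by_cases hc : cur ≠ 0
      · simp only [if_pos hc, hc, ite_true, ih (acc ++ [cur]) 0, List.append_assoc]
        rfl
      · simp only [if_neg hc, hc, ite_false]
        exact ih acc 0

-- spelling-out of R via the leading run
lemma R_lead (s : List Int) : ∀ cur : Nat,
    R cur s =
      if leadc s = s.length then (if cur + leadc s ≠ 0 then [cur + leadc s] else [])
      else if cur + leadc s ≠ 0 then (cur + leadc s) :: R 0 (s.drop (leadc s + 1))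
           else R 0 (s.drop (leadc s + 1)) := by
  induction s with
  | nil => intro cur; simp [R, leadc]
  | cons x xs ih =>
    intro cur
    by_cases hx : x = 0
    · subst hx
      rw [show R cur ((0:Int) :: xs) = R (cur + 1) xs from by simp [R], ih (cur + 1),
        leadc_cons_zero]
      simp only [List.length_cons, List.drop_succ_cons]
      have e : cur + 1 + leadc xs = cur + (leadc xs + 1) := by omega
      rw [e]
      by_cases hl : leadc xs = xs.length
      · rw [if_pos hl, if_pos (show leadc xs + 1 = xs.length + 1 by omega)]
      · rw [if_neg hl, if_neg (show ¬ leadc xs + 1 = xs.length + 1 by omega)]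
    · have h0 : leadc (x :: xs) = 0 := by simp [leadc, hx]
      rw [show R cur (x :: xs) = if cur ≠ 0 then cur :: R 0 xs else R 0 xs from by
        simp [R, hx], h0]
      rw [if_neg (show ¬ (0 = (x :: xs).length) by simp)]
      simp

-- the first non-zero element after the leading run
lemma drop_leadc (s : List Int) (h : leadc s < s.length) :
    ∃ y t, s.drop (leadc s) = y :: t ∧ y ≠ 0 := by
  induction s with
  | nil => simp at h
  | cons x xs ih =>
    by_cases hx : x = 0
    · subst hx
      have h1 := leadc_cons_zero xs
      rw [h1] at h ⊢
      simp only [List.length_cons] at h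
      obtain ⟨y, t, ht, hy⟩ := ih (by omega)
      exact ⟨y, t, by simpa [List.drop_succ_cons] using ht, hy⟩
    · have h0 : leadc (x :: xs) = 0 := by simp [leadc, hx]
      exact ⟨x, xs, by simp [h0], hx⟩

-- a list-level reading of A's outer loop (proof helper only)
def G : List Int → Int → Int
  | [], tc => tc
  | x :: xs, tc =>
    if x = 0 then
      let c := leadc (x :: xs)
      if c < 4 then 0
      else if c = (x :: xs).length then tc + 1
      else G ((x :: xs).drop c) (tc + 1)
    else G xs tc
termination_by l => l.length
decreasing_by
  · have : leadc (x :: xs) ≥ 1 := by simp [leadc, *]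
    simp only [List.length_drop, List.length_cons]
    omega
  · simp

lemma zpInner_eq (arr : List Int) : ∀ z count i0, z ≤ arr.length →
    zpInner arr z count i0 =
      if leadc (arr.drop z) = (arr.drop z).length then (count + leadc (arr.drop z), false, i0)
      else (count + leadc (arr.drop z), true, z + leadc (arr.drop z)) := by
  intro z
  induction' hn : arr.length - z using Nat.strong_induction_on with n ih generalizing z
  intro count i0 hz
  rw [zpInner]
  by_cases h : z < arr.length
  · have hdrop : arr.drop z = arr[z] :: arr.drop (z + 1) := by
      rw [List.drop_eq_getElem_cons h]
    by_cases h0 : arr[z] = 0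
    · rw [dif_pos h, if_pos h0]
      have := ih (arr.length - (z + 1)) (by omega) (z + 1) rfl (count + 1) i0 (by omega)
      rw [this]
      rw [hdrop]
      simp only [h0, leadc_cons_zero, List.length_cons]
      split <;> split <;> simp_all <;> omega
    · rw [dif_pos h, if_neg h0]
      have hl : leadc (arr.drop z) = 0 := by rw [hdrop]; simp [leadc, h0]
      have hne : leadc (arr.drop z) ≠ (arr.drop z).length := by
        rw [hl, hdrop]; simp only [List.length_cons]; omega
      rw [if_neg hne, hl]
      simp
  · rw [dif_neg h]
    have he : arr.drop z = [] := List.drop_eq_nil_of_le (by omega)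
    simp [he, leadc]

lemma zpLoop_eq_G (arr : List Int) : ∀ fuel i tc, arr.length - i < fuel →
    zpLoop arr fuel i tc = G (arr.drop i) tc := by
  intro fuel
  induction fuel with
  | zero => intro i tc h; omega
  | succ fuel ih =>
    intro i tc h
    rw [zpLoop]
    by_cases hi : i < arr.length
    · have hdrop : arr.drop i = arr[i] :: arr.drop (i + 1) := by
        rw [List.drop_eq_getElem_cons hi]
      by_cases h0 : arr[i] = 0
      · rw [dif_pos hi, if_pos h0]
        rw [zpInner_eq arr i 0 i (by omega)]
        have hslen : (arr.drop i).length = arr.length - i := by simp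
        have hlead1 : 1 ≤ leadc (arr.drop i) := by rw [hdrop]; simp [leadc, h0]
        have hle := leadc_le (arr.drop i)
        have hG : G (arr.drop i) tc =
            if leadc (arr.drop i) < 4 then 0
            else if leadc (arr.drop i) = (arr.drop i).length then tc + 1
            else G ((arr.drop i).drop (leadc (arr.drop i))) (tc + 1) := by
          conv_lhs => rw [hdrop]
          rw [G, if_pos h0, ← hdrop]
        rw [hG]
        by_cases hall : leadc (arr.drop i) = (arr.drop i).length
        · rw [if_pos hall, if_pos hall]
          by_cases h4 : leadc (arr.drop i) < 4 <;> simp [h4]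
        · rw [if_neg hall, if_neg hall]
          by_cases h4 : leadc (arr.drop i) < 4
          · simp [h4]
          · have hdd : arr.drop (i + leadc (arr.drop i)) =
                (arr.drop i).drop (leadc (arr.drop i)) := by
              rw [List.drop_drop]
            have hih := ih (i + leadc (arr.drop i)) (tc + 1) (by omega)
            rw [hdd] at hih
            simp [h4, hih]
      · rw [dif_pos hi, if_neg h0]
        rw [ih (i + 1) tc (by omega), hdrop, G, if_neg h0]
    · rw [dif_neg hi]
      rw [List.drop_eq_nil_of_le (by omega), G]

lemma G_eq_R (l : List Int) : ∀ tc,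
    G l tc = if (R 0 l).any (fun r => r < 4) then 0 else tc + ((R 0 l).length : Int) := by
  induction' hn : l.length using Nat.strong_induction_on with n ih generalizing l
  intro tc
  match l with
  | [] => simp [G, R]
  | x :: xs =>
    by_cases hx : x = 0
    · subst hx
      set s : List Int := 0 :: xs with hs
      have hlead1 : 1 ≤ leadc s := by simp [hs, leadc_cons_zero]
      have hle := leadc_le s
      have hR : R 0 s =
          if leadc s = s.length then [leadc s]
          else leadc s :: R 0 (s.drop (leadc s + 1)) := by
        have hne0 : leadc s ≠ 0 := by omega
        rw [R_lead s 0]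
        simp only [Nat.zero_add]
        split <;> simp [hne0]
      have hG : G s tc =
          if leadc s < 4 then 0
          else if leadc s = s.length then tc + 1
          else G (s.drop (leadc s)) (tc + 1) := by
        rw [hs, G, if_pos rfl, ← hs]
      rw [hG]
      by_cases h4 : leadc s < 4
      · rw [if_pos h4, hR]
        split <;> simp [h4]
      · rw [if_neg h4]
        by_cases hall : leadc s = s.length
        · rw [if_pos hall, hR, if_pos hall]
          simp [show ¬ (leadc s < 4) from h4]
        · rw [if_neg hall, hR, if_neg hall]
          obtain ⟨y, t, ht, hy⟩ := drop_leadc s (by omega)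
          have ht' : s.drop (leadc s + 1) = t := by
            have : s.drop (leadc s + 1) = (s.drop (leadc s)).drop 1 := by
              rw [List.drop_drop]
            rw [this, ht]; simp
          have hGd : G (s.drop (leadc s)) (tc + 1) = G t (tc + 1) := by
            rw [ht, G, if_neg hy]
          rw [hGd, ht']
          have hlt : t.length < n := by
            have := congrArg List.length ht
            simp only [List.length_drop, List.length_cons] at this
            omega
          rw [ih t.length hlt t rfl (tc + 1)]
          simp only [List.any_cons, List.length_cons]
          have : ¬ ((leadc s : Nat) < 4) := h4
          simp only [decide_eq_true_eq] at *
          by_cases ha : (R 0 t).any (fun r => r < 4)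
          · simp [ha, this]
          · simp only [ha, if_false, Bool.or_false]
            rw [if_neg (show ¬ (decide (leadc s < 4) = true) by simpa using this)]
            push_cast
            ring
    · have hR : R 0 (x :: xs) = R 0 xs := by simp [R, hx]
      rw [show G (x :: xs) tc = G xs tc from by rw [G, if_neg hx], hR]
      exact ih xs.length (by simp [← hn]) xs rfl tc

-- ===== VERDICT (by name: the statement is the Claim_ definition above) =====
theorem zero_plentiful_spec : Claim_equal_zero_plentiful := by
  intro arr _
  unfold Spec_zero_plentiful zero_plentiful zero_plentiful_alt
  rw [zpLoop_eq_G arr (arr.length + 1) 0 0 (by omega)]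
  simp only [List.drop_zero]
  rw [G_eq_R arr 0]
  have := foldl_R arr [] 0
  simp only [List.nil_append] at this
  rw [this]
  split <;> simp
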